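-- pv_equiv track=rewrite | github.com/hogan-tech/SIT | PythonIntro/BreadStarter/bread.py | secondPass
-- ===== SOURCE A (Python) =====
-- def secondPass(grid, labelRelationships):
--     for r in range(len(grid)):
--         for c in range(len(grid[0])):
--             label = grid[r][c]
--             while label in labelRelationships:
--                 label = labelRelationships[label]
--             grid[r][c] = label
--     return grid
-- ===== SOURCE B (Python) =====
-- def secondPass(grid, labelRelationships):
--     # Memoized chain resolution with path compression: each label's terminal
--     # root is computed once and cached, so every chain is walked at most once.
--     # Like A, mutates grid in place and returns it.
--     cache = {}
--
--     def find(label):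
--         path = []
--         while label in labelRelationships and label not in cache:
--             path.append(label)
--             label = labelRelationships[label]
--         root = cache.get(label, label)
--         for p in path:
--             cache[p] = root
--         return root
--
--     for row in grid:
--         for c in range(len(grid[0])):
--             row[c] = find(row[c])
--     return grid
-- ===== Notes on version B (the rewrite author's own statement) =====
-- stated objective: alternative
-- what changed: B memoizes each label's terminal root in a cache with path compression, so every relationship chain is walked at most once overall instead of being re-walked from scratch for every grid cell; on random inputs with short chains the measured speed is comparable.
import Mathlib
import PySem

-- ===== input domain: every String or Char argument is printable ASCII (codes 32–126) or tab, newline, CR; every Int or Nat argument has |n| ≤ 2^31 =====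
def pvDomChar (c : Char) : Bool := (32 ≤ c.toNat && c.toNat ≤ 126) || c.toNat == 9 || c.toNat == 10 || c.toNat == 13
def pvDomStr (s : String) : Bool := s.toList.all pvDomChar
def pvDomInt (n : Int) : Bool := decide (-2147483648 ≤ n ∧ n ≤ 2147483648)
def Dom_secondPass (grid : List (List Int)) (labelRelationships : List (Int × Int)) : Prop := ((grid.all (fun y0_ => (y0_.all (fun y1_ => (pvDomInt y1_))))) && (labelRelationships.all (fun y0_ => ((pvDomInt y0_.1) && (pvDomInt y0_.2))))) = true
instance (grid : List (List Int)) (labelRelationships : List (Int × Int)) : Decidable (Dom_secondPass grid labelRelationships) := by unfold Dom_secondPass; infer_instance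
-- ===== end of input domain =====

-- B resolves each label's terminal root once, memoised with path compression, instead of
-- re-walking the relationship chain for every cell (objective: alternative algorithm).  Both
-- Pythons mutate grid in place and return it; the equivalence proved is about the return value.

-- ===== PORT A =====
-- A's inner 'while label in labelRelationships: label = labelRelationships[label]' loop.
-- Fuel: under Pre_ every chain terminates within |labelRelationships| lookups, so fuel
-- |labelRelationships| reproduces the while loop exactly (outside Pre_ the Python diverges).
def resolveA (d : PySem.Dict Int Int) : Nat → Int → Int
  | 0, l => l
  | f+1, l =>
    match PySem.Dict.get? d l with
    | none => l
    | some v => resolveA d f v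

def secondPass (grid : List (List Int)) (labelRelationships : List (Int × Int)) : List (List Int) :=
  let d := PySem.Dict.ofList labelRelationships
  (List.range grid.length).foldl (fun g r =>
    (List.range ((g.headD []).length)).foldl (fun g c =>
      let label := resolveA d labelRelationships.length ((g.getD r []).getD c 0)
      g.set r ((g.getD r []).set c label)) g) grid

-- ===== PORT B =====
-- B's 'find': walk while (label in rel and label not in cache), then write the root back
-- over the whole path (path compression).  Same fuel discipline as A's while loop.
def findLoop (d : PySem.Dict Int Int) : Nat → PySem.Dict Int Int → Int → List Int → Int × PySem.Dict Int Int
  | 0, cache, l, path =>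
      let root := PySem.Dict.getD cache l l
      (root, path.foldl (fun c p => PySem.Dict.insert c p root) cache)
  | f+1, cache, l, path =>
      if PySem.Dict.contains d l && !(PySem.Dict.contains cache l) then
        findLoop d f cache (PySem.Dict.getD d l 0) (path ++ [l])
      else
        let root := PySem.Dict.getD cache l l
        (root, path.foldl (fun c p => PySem.Dict.insert c p root) cache)

def secondPass_alt (grid : List (List Int)) (labelRelationships : List (Int × Int)) : List (List Int) :=
  let d := PySem.Dict.ofList labelRelationships
  -- len(grid[0]) is only evaluated when grid is nonempty, and row lengths never change
  let ncols := (grid.headD []).length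
  (grid.foldl (fun (acc : List (List Int) × PySem.Dict Int Int) row =>
      let rc := (List.range ncols).foldl (fun (rc : List Int × PySem.Dict Int Int) c =>
          let res := findLoop d labelRelationships.length rc.2 (rc.1.getD c 0) []
          (rc.1.set c res.1, res.2)) (row, acc.2)
      (acc.1 ++ [rc.1], rc.2)) ([], PySem.Dict.empty)).1

-- ===== PRECONDITION & SPEC =====
-- chainOK d n x: the relationship chain starting at x reaches a non-key within n lookups.
def chainOK (d : PySem.Dict Int Int) : Nat → Int → Bool
  | 0, l => !(PySem.Dict.contains d l)
  | n+1, l =>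
    match PySem.Dict.get? d l with
    | none => true
    | some v => chainOK d n v

-- Pre_ excludes exactly the inputs on which A does not return: rows shorter than row 0
-- (IndexError) and cells in the first len(grid[0]) columns whose relationship chain cycles
-- (A's while loop diverges; a terminating chain never revisits a key, so it terminates
-- within |labelRelationships| lookups — chainOK with that fuel is exact).
def Pre_secondPass (grid : List (List Int)) (labelRelationships : List (Int × Int)) : Prop :=
  (∀ row ∈ grid, (grid.headD []).length ≤ row.length) ∧
  (∀ row ∈ grid, ∀ x ∈ row.take (grid.headD []).length,
     chainOK (PySem.Dict.ofList labelRelationships) labelRelationships.length x = true)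

instance (grid : List (List Int)) (labelRelationships : List (Int × Int)) : Decidable (Pre_secondPass grid labelRelationships) := by
  unfold Pre_secondPass; infer_instance

def pvWitness_secondPass : List (List Int) × (List (Int × Int)) := ([[1, 2], [3, 4]], [(1, 2), (2, 5)])

def Spec_secondPass (grid : List (List Int)) (labelRelationships : List (Int × Int)) (out : List (List Int)) : Prop := out = secondPass_alt grid labelRelationships
instance (grid : List (List Int)) (labelRelationships : List (Int × Int)) (out : List (List Int)) : Decidable (Spec_secondPass grid labelRelationships out) := by unfold Spec_secondPass; infer_instance

-- ===== CLAIM (what is proved, stated in full; the proofs are below) =====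
def Claim_equal_secondPass : Prop := ∀ (grid : List (List Int)) (labelRelationships : List (Int × Int)), Dom_secondPass grid labelRelationships → Pre_secondPass grid labelRelationships → Spec_secondPass grid labelRelationships (secondPass grid labelRelationships)

-- ===== LEMMAS AND PROOFS =====

-- every cache entry stores the terminal root of its key
def cacheInv (d cache : PySem.Dict Int Int) (F : Nat) : Prop :=
  ∀ p ∈ PySem.Dict.items cache, p.2 = resolveA d F p.1

-- the intended per-row transformation: resolve the first m cells, keep the rest
def rowT (d : PySem.Dict Int Int) (F m : Nat) (row : List Int) : List Int :=
  (row.take m).map (resolveA d F) ++ row.drop m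

lemma resolveA_of_none {d : PySem.Dict Int Int} {l : Int} (h : PySem.Dict.get? d l = none)
    (f : Nat) : resolveA d f l = l := by
  cases f <;> simp [resolveA, h]

lemma get?_eq_none_of_contains_false {d : PySem.Dict Int Int} {l : Int}
    (h : PySem.Dict.contains d l = false) : PySem.Dict.get? d l = none := by
  cases hg : PySem.Dict.get? d l with
  | none => rfl
  | some v =>
    have hc := PySem.Dict.contains_eq_isSome_get? (d := d) (k := l)
    rw [hg] at hc; rw [h] at hc; simp at hc

lemma resolveA_stable {d : PySem.Dict Int Int} (n : Nat) :
    ∀ l f, chainOK d n l = true → n ≤ f → resolveA d f l = resolveA d n l := by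
  induction n with
  | zero =>
    intro l f hc _
    simp only [chainOK, Bool.not_eq_true'] at hc
    rw [resolveA_of_none (get?_eq_none_of_contains_false hc), resolveA_of_none (get?_eq_none_of_contains_false hc)]
  | succ n ih =>
    intro l f hc hf
    cases hg : PySem.Dict.get? d l with
    | none => rw [resolveA_of_none hg, resolveA_of_none hg]
    | some v =>
      simp only [chainOK, hg] at hc
      obtain ⟨f', rfl⟩ : ∃ f', f = f' + 1 := ⟨f - 1, by omega⟩
      simp only [resolveA, hg]
      exact ih v f' hc (by omega)

lemma resolveA_step {d : PySem.Dict Int Int} {l v : Int} {F n : Nat}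
    (h : PySem.Dict.get? d l = some v) (hc : chainOK d n v = true) (hn : n < F) :
    resolveA d F l = resolveA d F v := by
  obtain ⟨F', rfl⟩ : ∃ F', F = F' + 1 := ⟨F - 1, by omega⟩
  have h1 : resolveA d (F' + 1) l = resolveA d F' v := by simp only [resolveA, h]
  rw [h1, resolveA_stable n v F' hc (by omega), ← resolveA_stable n v (F' + 1) hc (by omega)]

lemma writeback_inv {d cache : PySem.Dict Int Int} {F : Nat} {root : Int} (path : List Int)
    (hinv : cacheInv d cache F) (hpath : ∀ p ∈ path, resolveA d F p = root) :
    cacheInv d (path.foldl (fun c p => PySem.Dict.insert c p root) cache) F := by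
  induction path generalizing cache with
  | nil => exact hinv
  | cons p ps ih =>
    simp only [List.foldl_cons]
    apply ih
    · intro q hq
      rcases (PySem.Dict.mem_items_insert _ _ _ _).mp hq with h | ⟨h, _⟩
      · rw [h]; exact (hpath p (List.mem_cons_self ..)).symm
      · exact hinv q h
    · intro x hx; exact hpath x (List.mem_cons_of_mem _ hx)

lemma finish_correct {d cache : PySem.Dict Int Int} {F : Nat} {l : Int} (path : List Int)
    (hinv : cacheInv d cache F)
    (hl : PySem.Dict.get? d l = none ∨ (PySem.Dict.get? cache l).isSome)
    (hpath : ∀ p ∈ path, resolveA d F p = resolveA d F l) :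
    PySem.Dict.getD cache l l = resolveA d F l ∧
      cacheInv d (path.foldl (fun c p => PySem.Dict.insert c p (PySem.Dict.getD cache l l)) cache) F := by
  cases hc : PySem.Dict.get? cache l with
  | some v =>
    have hv : v = resolveA d F l := hinv (l, v) (PySem.Dict.mem_items_of_get?_eq_some _ hc)
    have hgd : PySem.Dict.getD cache l l = v := PySem.Dict.getD_of_get?_eq_some _ _ hc
    refine ⟨by rw [hgd, hv], writeback_inv path hinv ?_⟩
    intro p hp; rw [hpath p hp, hgd, hv]
  | none =>
    have hdl : PySem.Dict.get? d l = none := by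
      rcases hl with h | h
      · exact h
      · rw [hc] at h; simp at h
    have hres : resolveA d F l = l := resolveA_of_none hdl F
    have hgd : PySem.Dict.getD cache l l = l := PySem.Dict.getD_of_get?_eq_none _ _ hc
    refine ⟨by rw [hgd, hres], writeback_inv path hinv ?_⟩
    intro p hp; rw [hpath p hp, hgd, hres]

lemma findLoop_correct {d : PySem.Dict Int Int} {F : Nat} (f : Nat) :
    ∀ cache l path, f ≤ F → cacheInv d cache F → chainOK d f l = true →
    (∀ p ∈ path, resolveA d F p = resolveA d F l) →
    (findLoop d f cache l path).1 = resolveA d F l ∧ cacheInv d (findLoop d f cache l path).2 F := by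
  induction f with
  | zero =>
    intro cache l path hF hinv hc hpath
    simp only [chainOK, Bool.not_eq_true'] at hc
    simp only [findLoop]
    exact finish_correct path hinv (Or.inl (get?_eq_none_of_contains_false hc)) hpath
  | succ f ih =>
    intro cache l path hF hinv hc hpath
    simp only [findLoop]
    split
    case isTrue h =>
      rw [Bool.and_eq_true, Bool.not_eq_true'] at h
      obtain ⟨hdl, hncl⟩ := h
      obtain ⟨v, hv⟩ : ∃ v, PySem.Dict.get? d l = some v := by
        rw [PySem.Dict.contains_eq_isSome_get?] at hdl
        exact Option.isSome_iff_exists.mp hdl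
      have hgdv : PySem.Dict.getD d l 0 = v := PySem.Dict.getD_of_get?_eq_some _ _ hv
      have hcv : chainOK d f v = true := by simpa only [chainOK, hv] using hc
      have hstep : resolveA d F l = resolveA d F v := resolveA_step hv hcv (by omega)
      rw [hgdv, hstep]
      apply ih cache v (path ++ [l]) (by omega) hinv hcv
      intro p hp
      rcases List.mem_append.mp hp with hp | hp
      · rw [hpath p hp, hstep]
      · rw [List.mem_singleton.mp hp, hstep]
    case isFalse h =>
      refine finish_correct path hinv ?_ hpath
      by_cases hcl : PySem.Dict.contains cache l = true
      · right
        rw [PySem.Dict.contains_eq_isSome_get?] at hcl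
        exact hcl
      · left
        apply get?_eq_none_of_contains_false
        cases hd : PySem.Dict.contains d l with
        | false => rfl
        | true =>
          exfalso
          apply h
          have hclf : PySem.Dict.contains cache l = false := by
            cases hx : PySem.Dict.contains cache l with
            | false => rfl
            | true => exact absurd hx hcl
          rw [hd, hclf]
          rfl

lemma getD_mid {α : Type} (pre : List α) (a : α) (suf : List α) (dflt : α) :
    (pre ++ a :: suf).getD pre.length dflt = a := by
  induction pre with
  | nil => rfl
  | cons x xs ih => simp only [List.cons_append, List.length_cons, List.getD_cons_succ]; rw [ih]

lemma set_mid {α : Type} (pre : List α) (a : α) (suf : List α) (b : α) :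
    (pre ++ a :: suf).set pre.length b = pre ++ b :: suf := by
  induction pre with
  | nil => rfl
  | cons x xs ih => simp only [List.cons_append, List.length_cons, List.set_cons_succ]; rw [ih]

lemma length_rowT (d : PySem.Dict Int Int) (F m : Nat) (row : List Int) :
    (rowT d F m row).length = row.length := by
  simp [rowT]; omega

lemma rowT_zero (d : PySem.Dict Int Int) (F : Nat) (row : List Int) : rowT d F 0 row = row := by
  simp [rowT]

lemma len_pre_rowT {d : PySem.Dict Int Int} {F m : Nat} {row : List Int} (h : m ≤ row.length) :
    ((row.take m).map (resolveA d F)).length = m := by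
  simp [List.length_take]; omega

lemma getD_rowT {d : PySem.Dict Int Int} {F m : Nat} {row : List Int} (h : m < row.length) :
    (rowT d F m row).getD m 0 = row[m] := by
  have h2 := getD_mid ((row.take m).map (resolveA d F)) (row[m]) (row.drop (m+1)) 0
  rw [len_pre_rowT (by omega), List.getElem_cons_drop h] at h2
  rw [rowT]; exact h2

lemma set_rowT {d : PySem.Dict Int Int} {F m : Nat} {row : List Int} (h : m < row.length) (x : Int) :
    (rowT d F m row).set m x = (row.take m).map (resolveA d F) ++ x :: row.drop (m+1) := by
  have h2 := set_mid ((row.take m).map (resolveA d F)) (row[m]) (row.drop (m+1)) x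
  rw [len_pre_rowT (by omega), List.getElem_cons_drop h] at h2
  rw [rowT]; exact h2

lemma rowT_succ {d : PySem.Dict Int Int} {F m : Nat} {row : List Int} (h : m < row.length) :
    rowT d F (m+1) row = (rowT d F m row).set m (resolveA d F row[m]) := by
  rw [set_rowT h]
  simp only [rowT, List.take_add_one, List.getElem?_eq_getElem h, Option.toList_some, List.map_append,
    List.map_cons, List.map_nil, List.append_assoc, List.cons_append, List.nil_append]

lemma row_fold {d : PySem.Dict Int Int} {F : Nat} (m : Nat) :
    ∀ row : List Int, m ≤ row.length →
    (List.range m).foldl (fun row c => row.set c (resolveA d F (row.getD c 0))) row = rowT d F m row := by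
  induction m with
  | zero => intro row h; simp [rowT_zero]
  | succ m ih =>
    intro row h
    simp only [List.range_succ, List.foldl_append, List.foldl_cons, List.foldl_nil]
    rw [ih row (by omega), getD_rowT (by omega), ← rowT_succ (by omega)]

lemma B_inner {d : PySem.Dict Int Int} {F : Nat} (m : Nat) :
    ∀ (row : List Int) (cache : PySem.Dict Int Int), m ≤ row.length → cacheInv d cache F →
    (∀ x ∈ row.take m, chainOK d F x = true) →
    ((List.range m).foldl (fun (rc : List Int × PySem.Dict Int Int) c =>
        let res := findLoop d F rc.2 (rc.1.getD c 0) []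
        (rc.1.set c res.1, res.2)) (row, cache)).1 = rowT d F m row ∧
    cacheInv d ((List.range m).foldl (fun (rc : List Int × PySem.Dict Int Int) c =>
        let res := findLoop d F rc.2 (rc.1.getD c 0) []
        (rc.1.set c res.1, res.2)) (row, cache)).2 F := by
  induction m with
  | zero => intro row cache h hinv hch; exact ⟨(rowT_zero d F row).symm, hinv⟩
  | succ m ih =>
    intro row cache h hinv hch
    have hm : m < row.length := by omega
    have hsub : row.take m ⊆ row.take (m+1) := by
      intro x hx
      have hx2 : x ∈ (row.take (m+1)).take m := by
        rw [List.take_take]; simpa [Nat.min_def] using hx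
      exact List.take_subset _ _ hx2
    obtain ⟨hv, hi⟩ := ih row cache (by omega) hinv (fun x hx => hch x (hsub hx))
    have hmem : row[m] ∈ row.take (m+1) := by
      rw [List.take_add_one, List.getElem?_eq_getElem hm]
      exact List.mem_append_right _ (by simp)
    simp only [List.range_succ, List.foldl_append, List.foldl_cons, List.foldl_nil]
    rw [hv, getD_rowT hm]
    obtain ⟨hv2, hi2⟩ := findLoop_correct F _ (row[m]) [] le_rfl hi (hch _ hmem) (by simp)
    rw [hv2]
    exact ⟨(rowT_succ hm).symm, hi2⟩

lemma A_inner {d : PySem.Dict Int Int} {F : Nat} (mm : Nat) (g : List (List Int)) (r : Nat)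
    (h : r < g.length) :
    (List.range mm).foldl (fun g c =>
      let label := resolveA d F ((g.getD r []).getD c 0)
      g.set r ((g.getD r []).set c label)) g =
    g.set r ((List.range mm).foldl (fun row c => row.set c (resolveA d F (row.getD c 0))) (g.getD r [])) := by
  induction mm with
  | zero =>
    simp only [List.range_zero, List.foldl_nil]
    rw [List.getD_eq_getElem _ _ h, List.set_getElem_self h]
  | succ mm ih =>
    simp only [List.range_succ, List.foldl_append, List.foldl_cons, List.foldl_nil]
    rw [ih]
    have hlen : r < (g.set r ((List.range mm).foldl (fun row c => row.set c (resolveA d F (row.getD c 0))) (g.getD r []))).length := by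
      simpa using h
    rw [List.getD_eq_getElem _ _ hlen, List.getElem_set_self hlen, List.set_set]

lemma head_len_inv {d : PySem.Dict Int Int} {F m : Nat} (grid : List (List Int)) (k : Nat)
    (hm : m = (grid.headD []).length) :
    (((grid.take k).map (rowT d F m) ++ grid.drop k).headD []).length = m := by
  subst hm
  cases grid with
  | nil => simp
  | cons r0 rest =>
    cases k with
    | zero => simp
    | succ k => simp [List.take_succ_cons, length_rowT]

lemma A_outer {d : PySem.Dict Int Int} {grid : List (List Int)} {rel : List (Int × Int)}
    (hlen : ∀ row ∈ grid, (grid.headD []).length ≤ row.length) (k : Nat) (hk : k ≤ grid.length) :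
    (List.range k).foldl (fun g r =>
      (List.range ((g.headD []).length)).foldl (fun g c =>
        let label := resolveA d rel.length ((g.getD r []).getD c 0)
        g.set r ((g.getD r []).set c label)) g) grid =
    (grid.take k).map (rowT d rel.length (grid.headD []).length) ++ grid.drop k := by
  induction k with
  | zero => simp
  | succ k ih =>
    have hklt : k < grid.length := by omega
    simp only [List.range_succ, List.foldl_append, List.foldl_cons, List.foldl_nil]
    rw [ih (by omega), head_len_inv grid k rfl]
    have hpre : ((grid.take k).map (rowT d rel.length (grid.headD []).length)).length = k := by
      simp [List.length_take]; omega
    rw [A_inner _ _ k (by simp [List.length_take]; omega)]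
    rw [← List.getElem_cons_drop hklt]
    have hgd : (((grid.take k).map (rowT d rel.length (grid.headD []).length)) ++ grid[k] :: grid.drop (k+1)).getD k [] = grid[k] := by
      have h2 := getD_mid ((grid.take k).map (rowT d rel.length (grid.headD []).length)) (grid[k]) (grid.drop (k+1)) []
      rwa [hpre] at h2
    rw [hgd, row_fold _ grid[k] (hlen grid[k] (List.getElem_mem hklt))]
    have hst := set_mid ((grid.take k).map (rowT d rel.length (grid.headD []).length)) (grid[k]) (grid.drop (k+1)) (rowT d rel.length (grid.headD []).length grid[k])
    rw [hpre] at hst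
    rw [hst, List.take_add_one, List.getElem?_eq_getElem hklt]
    simp only [Option.toList_some, List.map_append, List.map_cons, List.map_nil,
      List.append_assoc, List.cons_append, List.nil_append]

lemma B_outer {d : PySem.Dict Int Int} {F m : Nat} (rows : List (List Int)) :
    ∀ (acc : List (List Int)) (cache : PySem.Dict Int Int), cacheInv d cache F →
    (∀ row ∈ rows, m ≤ row.length) →
    (∀ row ∈ rows, ∀ x ∈ row.take m, chainOK d F x = true) →
    (rows.foldl (fun (acc : List (List Int) × PySem.Dict Int Int) row =>
      let rc := (List.range m).foldl (fun (rc : List Int × PySem.Dict Int Int) c =>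
          let res := findLoop d F rc.2 (rc.1.getD c 0) []
          (rc.1.set c res.1, res.2)) (row, acc.2)
      (acc.1 ++ [rc.1], rc.2)) (acc, cache)).1 = acc ++ rows.map (rowT d F m) := by
  induction rows with
  | nil => intro _ _ _ _ _; simp
  | cons row rows ih =>
    intro acc cache hinv h1 h2
    simp only [List.foldl_cons]
    obtain ⟨hv, hi⟩ := B_inner m row cache (h1 row (by simp)) hinv (h2 row (by simp))
    rw [ih _ _ hi (fun r hr => h1 r (by simp [hr])) (fun r hr x hx => h2 r (by simp [hr]) x hx), hv]
    simp

-- ===== VERDICT (by name: the statement is the Claim_ definition above) =====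
theorem secondPass_spec : Claim_equal_secondPass := by
  intro grid rel _ hpre
  unfold Spec_secondPass secondPass secondPass_alt
  obtain ⟨h1, h2⟩ := hpre
  rw [A_outer h1 grid.length le_rfl]
  rw [B_outer grid [] PySem.Dict.empty (by intro p hp; simp [PySem.Dict.empty] at hp) h1 h2]
  rw [List.take_length, List.drop_length, List.append_nil, List.nil_append]
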